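-- pv_equiv track=rewrite | github.com/giovannicjr/projetop1 | projeto.py | organizar
-- ===== SOURCE A (Python) =====
-- from string import ascii_letters
--
-- def prioridadeValida(pri):
--
--   if len(pri) == 3 and pri[0]=='(' and pri[2]==')' and pri[1] in ascii_letters :
--       return True
--
--   return False
--
-- def horaValida(horaMin):
--   if len(horaMin) != 4 or not soDigitos(horaMin):
--     return False
--   elif ((horaMin[:2] >= '0') and (horaMin[:2] <= '23')) and ((horaMin[2:4] >= '0') and (horaMin[2:4] <= '59')):
--     return True
--   else:
--     return False
--
-- def dataValida(data) :
--   if len(data) != 8 or not soDigitos(data):#separando data de acordo com o tamanho.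
--     return False
--   dia=data[:2];  mes=data[2:4];  ano=data[4:]
--   trintaDias=['04','06','09','11']
--   if not ano >= '2017':
--     return False
--   if mes in trintaDias:#numero de dias de acordo com o mes.
--     if(dia >= '01') and (dia <= '30'):
--         return True
--   elif mes == '02':
--     if(dia >= '01') and (dia <= '29'):
--         return True
--   elif (dia >= '01') and (dia <= '31'):
--         return True
--   else:
--       return False
--
--
--
--   return False
--
-- def projetoValido(proj):
--   if len(proj) > 1 and proj[0]=='+':
--     return True
--
--   return False
--
-- def contextoValido(cont):
--   if len(cont) > 1 and cont[0]=='@':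
--       return True
--
--   return False
--
-- def soDigitos(numero) :
--   if type(numero) != str :
--     return False
--   for x in numero :
--     if x < '0' or x > '9' :
--       return False
--   return True
--
-- def organizar(linhas):
--     itens=[]
--     for l in linhas:
--         l = l.strip() # remove espaços em branco e quebras de linha do começo e do fim
--         tokens = l.split()
--         prioridade = ''
--         desc = ''
--         data = ''
--         hora = ''
--         intens = ''
--         contexto = ''
--         projeto = ''
--         for x in tokens:#verificando se as funções estão validas.
--             if dataValida(x):
--                 data = x
--                 tokens[tokens.index(x)]=''
--             if horaValida(x):
--                 hora = x
--                 tokens[tokens.index(x)]=''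
--             if prioridadeValida(x):
--                 prioridade = x
--                 tokens[tokens.index(x)]=''
--             if contextoValido(x):
--                 contexto = x
--                 tokens[tokens.index(x)]=''
--             if projetoValido(x):
--                 projeto = x
--                 tokens[tokens.index(x)]=''
--         for x in tokens:
--             if x!='':
--                 desc+=x+' '
--         desc=desc[:-1]
--         itens.append((desc, (data, hora, prioridade, contexto, projeto)))
--     return itens
-- ===== SOURCE B (Python) =====
-- from string import ascii_letters
--
-- def prioridadeValida(pri):
--   if len(pri) == 3 and pri[0]=='(' and pri[2]==')' and pri[1] in ascii_letters:
--       return True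
--   return False
--
-- def horaValida(horaMin):
--   if len(horaMin) != 4 or not soDigitos(horaMin):
--     return False
--   elif ((horaMin[:2] >= '0') and (horaMin[:2] <= '23')) and ((horaMin[2:4] >= '0') and (horaMin[2:4] <= '59')):
--     return True
--   else:
--     return False
--
-- def dataValida(data):
--   if len(data) != 8 or not soDigitos(data):
--     return False
--   dia=data[:2];  mes=data[2:4];  ano=data[4:]
--   trintaDias=['04','06','09','11']
--   if not ano >= '2017':
--     return False
--   if mes in trintaDias:
--     if(dia >= '01') and (dia <= '30'):
--         return True
--   elif mes == '02':
--     if(dia >= '01') and (dia <= '29'):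
--         return True
--   elif (dia >= '01') and (dia <= '31'):
--         return True
--   else:
--       return False
--   return False
--
-- def projetoValido(proj):
--   if len(proj) > 1 and proj[0]=='+':
--     return True
--   return False
--
-- def contextoValido(cont):
--   if len(cont) > 1 and cont[0]=='@':
--       return True
--   return False
--
-- def soDigitos(numero):
--   if type(numero) != str:
--     return False
--   for x in numero:
--     if x < '0' or x > '9':
--       return False
--   return True
--
-- def organizar(linhas):
--     # single pass per line: classify each token once (the categories are mutually
--     # exclusive), last match wins, unmatched tokens are collected for the description
--     itens = []
--     for l in linhas:
--         data = hora = prioridade = contexto = projeto = ''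
--         desc_parts = []
--         for x in l.strip().split():
--             if dataValida(x):
--                 data = x
--             elif horaValida(x):
--                 hora = x
--             elif prioridadeValida(x):
--                 prioridade = x
--             elif contextoValido(x):
--                 contexto = x
--             elif projetoValido(x):
--                 projeto = x
--             else:
--                 desc_parts.append(x)
--         itens.append((' '.join(desc_parts), (data, hora, prioridade, contexto, projeto)))
--     return itens
-- ===== Notes on version B (the rewrite author's own statement) =====
-- stated objective: simpler
-- what changed: One pass per line: each token is classified once by an elif chain (the categories are mutually exclusive, last match wins) and unclassified tokens are collected into desc_parts joined at the end, removing A's in-place token clearing, the .index rescans and the second desc-building loop.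
import Mathlib
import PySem

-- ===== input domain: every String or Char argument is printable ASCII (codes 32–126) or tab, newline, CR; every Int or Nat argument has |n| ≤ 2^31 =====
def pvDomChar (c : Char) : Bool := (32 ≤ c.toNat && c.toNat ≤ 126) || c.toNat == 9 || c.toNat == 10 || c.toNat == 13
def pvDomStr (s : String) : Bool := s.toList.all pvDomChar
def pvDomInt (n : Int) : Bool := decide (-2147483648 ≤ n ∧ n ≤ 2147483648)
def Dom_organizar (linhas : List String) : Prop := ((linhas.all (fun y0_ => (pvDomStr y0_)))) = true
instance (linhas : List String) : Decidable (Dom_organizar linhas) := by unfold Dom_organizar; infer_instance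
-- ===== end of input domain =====

-- B replaces A's two inner loops (classify + clear-by-.index, then rebuild desc) by one
-- classification pass per line with an elif chain; objective: simpler.  Return value only
-- (A never mutates its argument).

-- ===== PORT A =====
-- shared helper functions of the module (used verbatim by both A and B)

-- Python string `a <= b` (lexicographic by code point); PySem.Chars.strLt is `<`
def strLe (a b : List Char) : Bool := !(PySem.Chars.strLt b a)

def soDigitos (numero : String) : Bool :=
  -- `type(numero) != str` is always false under the type convention
  numero.toList.all (fun x => !(decide (x < '0') || decide (x > '9')))

def prioridadeValida (pri : String) : Bool :=
  -- pri[0]/pri[1]/pri[2] guarded by len == 3, in range; `in ascii_letters` = ASCII letter = Char.isAlpha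
  let l := pri.toList
  if l.length == 3 && (PySem.List.pyGetD l 0 ' ' == '(') && (PySem.List.pyGetD l 2 ' ' == ')')
      && (PySem.List.pyGetD l 1 ' ').isAlpha then true else false

def horaValida (horaMin : String) : Bool :=
  let l := horaMin.toList
  if l.length != 4 || !soDigitos horaMin then false
  else if (strLe ['0'] (PySem.List.slice l none (some 2)) && strLe (PySem.List.slice l none (some 2)) ['2','3'])
       && (strLe ['0'] (PySem.List.slice l (some 2) (some 4)) && strLe (PySem.List.slice l (some 2) (some 4)) ['5','9'])
  then true else false

def dataValida (data : String) : Bool :=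
  let l := data.toList
  if l.length != 8 || !soDigitos data then false
  else
    let dia := PySem.List.slice l none (some 2)
    let mes := PySem.List.slice l (some 2) (some 4)
    let ano := PySem.List.slice l (some 4) none
    let trintaDias : List (List Char) := [['0','4'],['0','6'],['0','9'],['1','1']]
    if !(strLe ['2','0','1','7'] ano) then false
    else if trintaDias.contains mes then
      (if strLe ['0','1'] dia && strLe dia ['3','0'] then true else false)
    else if mes == ['0','2'] then
      (if strLe ['0','1'] dia && strLe dia ['2','9'] then true else false)
    else if strLe ['0','1'] dia && strLe dia ['3','1'] then true
    else false

def projetoValido (proj : String) : Bool :=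
  let l := proj.toList
  if 1 < l.length && (PySem.List.pyGetD l 0 ' ' == '+') then true else false

def contextoValido (cont : String) : Bool :=
  let l := cont.toList
  if 1 < l.length && (PySem.List.pyGetD l 0 ' ' == '@') then true else false

-- tokens[tokens.index(x)] = '' ; the none branch is unreachable (x was read from toks,
-- so Python's list.index cannot raise here)
def clearFirst (toks : List String) (x : String) : List String :=
  match PySem.List.index? toks x with
  | some j => toks.set j ""
  | none => toks

-- one iteration of A's first inner loop (`for x in tokens`, iterating by position over
-- the list it mutates; length never changes, so the positions are range(len(tokens)))
def stepA (st : List String × String × String × String × String × String) (i : Nat) :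
    List String × String × String × String × String × String :=
  match st with
  | (toks, data, hora, pri, ctx, proj) =>
    let x := toks.getD i ""          -- i < length throughout; default unreachable
    let r1 := if dataValida x then (clearFirst toks x, x) else (toks, data)
    let r2 := if horaValida x then (clearFirst r1.1 x, x) else (r1.1, hora)
    let r3 := if prioridadeValida x then (clearFirst r2.1 x, x) else (r2.1, pri)
    let r4 := if contextoValido x then (clearFirst r3.1 x, x) else (r3.1, ctx)
    let r5 := if projetoValido x then (clearFirst r4.1 x, x) else (r4.1, proj)
    (r5.1, r1.2, r2.2, r3.2, r4.2, r5.2)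

def innerA (tokens : List String) : List String × String × String × String × String × String :=
  (List.range tokens.length).foldl stepA (tokens, "", "", "", "", "")

-- A's second inner loop: desc += x + ' ' for the non-cleared tokens
def descA (toks : List String) : List Char :=
  toks.foldl (fun d x => if x = "" then d else d ++ x.toList ++ [' ']) []

def organizar (linhas : List String) : List (String × List String) :=
  linhas.foldl (fun itens l =>
    let tokens := PySem.Str.split₀ (PySem.Str.strip l)
    let r := innerA tokens
    let desc := String.ofList (PySem.List.slice (descA r.1) none (some (-1)))  -- desc[:-1]
    itens ++ [(desc, [r.2.1, r.2.2.1, r.2.2.2.1, r.2.2.2.2.1, r.2.2.2.2.2])]) []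

-- ===== PORT B =====
-- one classification pass: elif chain, last match wins, the rest goes to desc_parts
def stepB (st : List String × String × String × String × String × String) (x : String) :
    List String × String × String × String × String × String :=
  match st with
  | (parts, data, hora, pri, ctx, proj) =>
    if dataValida x then (parts, x, hora, pri, ctx, proj)
    else if horaValida x then (parts, data, x, pri, ctx, proj)
    else if prioridadeValida x then (parts, data, hora, x, ctx, proj)
    else if contextoValido x then (parts, data, hora, pri, x, proj)
    else if projetoValido x then (parts, data, hora, pri, ctx, x)
    else (parts ++ [x], data, hora, pri, ctx, proj)

def organizar_alt (linhas : List String) : List (String × List String) :=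
  linhas.foldl (fun itens l =>
    let tokens := PySem.Str.split₀ (PySem.Str.strip l)
    let st := tokens.foldl stepB ([], "", "", "", "", "")
    itens ++ [(PySem.Str.join " " st.1, [st.2.1, st.2.2.1, st.2.2.2.1, st.2.2.2.2.1, st.2.2.2.2.2])]) []

-- ===== PRECONDITION & SPEC =====
def Spec_organizar (linhas : List String) (out : List (String × List String)) : Prop := out = organizar_alt linhas
instance (linhas : List String) (out : List (String × List String)) : Decidable (Spec_organizar linhas out) := by unfold Spec_organizar; infer_instance

-- ===== CLAIM (what is proved, stated in full; the proofs are below) =====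
def Claim_equal_organizar : Prop := ∀ (linhas : List String), Dom_organizar linhas → Spec_organizar linhas (organizar linhas)

-- ===== LEMMAS AND PROOFS =====

-- a token is cleared by A / consumed by B iff one of the five validators accepts it
def pvValid (x : String) : Bool :=
  dataValida x || horaValida x || prioridadeValida x || contextoValido x || projetoValido x

-- the tokens list after i iterations of A's first loop: valid tokens among the first i cleared
def pvMask (l : List String) (i : Nat) : List String :=
  match l, i with
  | [], _ => []
  | l, 0 => l
  | t :: ts, Nat.succ i => (if pvValid t then "" else t) :: pvMask ts i

lemma pvMask_zero (l : List String) : pvMask l 0 = l := by cases l <;> rfl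

lemma pvMask_length (l : List String) (i : Nat) : (pvMask l i).length = l.length := by
  induction l generalizing i with
  | nil => rfl
  | cons t ts ih => cases i with
    | zero => rfl
    | succ i => simp [pvMask, ih]

-- shape extraction -------------------------------------------------------------
lemma soDigitos_mem {x : String} (h : soDigitos x = true) :
    ∀ c ∈ x.toList, '0' ≤ c ∧ c ≤ '9' := by
  simp only [soDigitos, List.all_eq_true] at h
  intro c hc
  have h2 := h c hc
  simp only [Bool.not_eq_eq_eq_not, Bool.not_true, Bool.or_eq_false_iff,
    decide_eq_false_iff_not, not_lt] at h2
  exact ⟨h2.1, h2.2⟩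

lemma dataValida_shape {x : String} (h : dataValida x = true) :
    x.toList.length = 8 ∧ soDigitos x = true := by
  cases hb : (x.toList.length != 8 || !soDigitos x) with
  | true => unfold dataValida at h; simp only [hb, if_true] at h; exact absurd h (by decide)
  | false =>
    simp only [Bool.or_eq_false_iff, bne_eq_false_iff_eq, Bool.not_eq_eq_eq_not,
      Bool.not_false] at hb
    exact ⟨hb.1, hb.2⟩

lemma horaValida_shape {x : String} (h : horaValida x = true) :
    x.toList.length = 4 ∧ soDigitos x = true := by
  cases hb : (x.toList.length != 4 || !soDigitos x) with
  | true => unfold horaValida at h; simp only [hb, if_true] at h; exact absurd h (by decide)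
  | false =>
    simp only [Bool.or_eq_false_iff, bne_eq_false_iff_eq, Bool.not_eq_eq_eq_not,
      Bool.not_false] at hb
    exact ⟨hb.1, hb.2⟩

lemma prioridadeValida_shape {x : String} (h : prioridadeValida x = true) :
    x.toList.length = 3 ∧ PySem.List.pyGetD x.toList 0 ' ' = '(' := by
  cases hb : (x.toList.length == 3 && (PySem.List.pyGetD x.toList 0 ' ' == '(')
      && (PySem.List.pyGetD x.toList 2 ' ' == ')') && (PySem.List.pyGetD x.toList 1 ' ').isAlpha) with
  | false => unfold prioridadeValida at h; simp only [hb] at h; exact absurd h (by decide)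
  | true =>
    simp only [Bool.and_eq_true, beq_iff_eq] at hb
    exact ⟨hb.1.1.1, hb.1.1.2⟩

lemma contextoValido_shape {x : String} (h : contextoValido x = true) :
    1 < x.toList.length ∧ PySem.List.pyGetD x.toList 0 ' ' = '@' := by
  cases hb : (decide (1 < x.toList.length) && (PySem.List.pyGetD x.toList 0 ' ' == '@')) with
  | false => unfold contextoValido at h; simp only [hb] at h; exact absurd h (by decide)
  | true =>
    simp only [Bool.and_eq_true, beq_iff_eq, decide_eq_true_eq] at hb
    exact hb

lemma projetoValido_shape {x : String} (h : projetoValido x = true) :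
    1 < x.toList.length ∧ PySem.List.pyGetD x.toList 0 ' ' = '+' := by
  cases hb : (decide (1 < x.toList.length) && (PySem.List.pyGetD x.toList 0 ' ' == '+')) with
  | false => unfold projetoValido at h; simp only [hb] at h; exact absurd h (by decide)
  | true =>
    simp only [Bool.and_eq_true, beq_iff_eq, decide_eq_true_eq] at hb
    exact hb

lemma pyGetD_zero_head {l : List Char} (hl : l ≠ []) :
    PySem.List.pyGetD l 0 ' ' = l.headD ' ' := by
  cases l with
  | nil => simp at hl
  | cons c cs => simp [PySem.List.pyGetD, PySem.List.pyGet?, PySem.List.pyIdx?]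

lemma digit_head {x : String} (hd : soDigitos x = true) (hl : 0 < x.toList.length) :
    '0' ≤ PySem.List.pyGetD x.toList 0 ' ' ∧ PySem.List.pyGetD x.toList 0 ' ' ≤ '9' := by
  cases hx : x.toList with
  | nil => simp [hx] at hl
  | cons c cs =>
    have := soDigitos_mem hd c (by simp [hx])
    rw [pyGetD_zero_head (List.cons_ne_nil c cs)]
    simpa using this

-- mutual exclusivity of the five categories -------------------------------------
lemma pvValid_cases {x : String} :
    dataValida x = true → (horaValida x = false ∧ prioridadeValida x = false ∧ contextoValido x = false ∧ projetoValido x = false) := by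
  intro hd
  obtain ⟨hlen, hdig⟩ := dataValida_shape hd
  refine ⟨?_, ?_, ?_, ?_⟩
  · cases hh : horaValida x with
    | false => rfl
    | true => exact absurd (horaValida_shape hh).1 (by omega)
  · cases hh : prioridadeValida x with
    | false => rfl
    | true => exact absurd (prioridadeValida_shape hh).1 (by omega)
  · cases hh : contextoValido x with
    | false => rfl
    | true =>
      have h1 := (contextoValido_shape hh).2
      have h2 := digit_head hdig (by omega)
      rw [h1] at h2; exact absurd h2 (by decide)
  · cases hh : projetoValido x with
    | false => rfl
    | true =>
      have h1 := (projetoValido_shape hh).2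
      have h2 := digit_head hdig (by omega)
      rw [h1] at h2; exact absurd h2 (by decide)

lemma hora_excl {x : String} :
    horaValida x = true → (prioridadeValida x = false ∧ contextoValido x = false ∧ projetoValido x = false) := by
  intro hd
  obtain ⟨hlen, hdig⟩ := horaValida_shape hd
  refine ⟨?_, ?_, ?_⟩
  · cases hh : prioridadeValida x with
    | false => rfl
    | true => exact absurd (prioridadeValida_shape hh).1 (by omega)
  · cases hh : contextoValido x with
    | false => rfl
    | true =>
      have h1 := (contextoValido_shape hh).2
      have h2 := digit_head hdig (by omega)
      rw [h1] at h2; exact absurd h2 (by decide)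
  · cases hh : projetoValido x with
    | false => rfl
    | true =>
      have h1 := (projetoValido_shape hh).2
      have h2 := digit_head hdig (by omega)
      rw [h1] at h2; exact absurd h2 (by decide)

lemma pri_excl {x : String} :
    prioridadeValida x = true → (contextoValido x = false ∧ projetoValido x = false) := by
  intro hd
  obtain ⟨hlen, hhead⟩ := prioridadeValida_shape hd
  constructor
  · cases hh : contextoValido x with
    | false => rfl
    | true => have := (contextoValido_shape hh).2; rw [hhead] at this; exact absurd this (by decide)
  · cases hh : projetoValido x with
    | false => rfl
    | true => have := (projetoValido_shape hh).2; rw [hhead] at this; exact absurd this (by decide)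

lemma ctx_excl {x : String} :
    contextoValido x = true → projetoValido x = false := by
  intro hd
  obtain ⟨hlen, hhead⟩ := contextoValido_shape hd
  cases hh : projetoValido x with
  | false => rfl
  | true => have := (projetoValido_shape hh).2; rw [hhead] at this; exact absurd this (by decide)

lemma pvValid_ne_empty {x : String} (h : pvValid x = true) : x ≠ "" := by
  intro he; subst he; exact absurd h (by decide)

-- mask lemmas -------------------------------------------------------------------
lemma pvMask_getElem_ge (l : List String) (i j : Nat) (hij : i ≤ j) (hj : j < l.length) :
    (pvMask l i).getD j "" = l[j] := by
  induction l generalizing i j with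
  | nil => simp at hj
  | cons t ts ih =>
    cases i with
    | zero => rw [pvMask_zero]; exact List.getD_eq_getElem _ _ hj
    | succ i =>
      cases j with
      | zero => omega
      | succ j => simpa [pvMask] using ih i j (by omega) (by simpa using hj)

lemma pvMask_take_mem (l : List String) (i : Nat) :
    ∀ y ∈ (pvMask l i).take i, y = "" ∨ pvValid y = false := by
  induction l generalizing i with
  | nil => intro y hy; simp [pvMask] at hy
  | cons t ts ih =>
    cases i with
    | zero => intro y hy; simp at hy
    | succ i =>
      intro y hy
      simp only [pvMask, List.take_succ_cons, List.mem_cons] at hy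
      rcases hy with hy | hy
      · subst hy
        cases hv : pvValid t with
        | true => left; simp [hv]
        | false => right; simpa [hv] using hv
      · exact ih i y hy

lemma pvMask_set (l : List String) (i : Nat) (hi : i < l.length) (hv : pvValid l[i] = true) :
    (pvMask l i).set i "" = pvMask l (i + 1) := by
  induction l generalizing i with
  | nil => simp at hi
  | cons t ts ih =>
    cases i with
    | zero => simp_all [pvMask, pvMask_zero]
    | succ i =>
      simp only [pvMask, List.set_cons_succ]
      rw [ih i (by simpa using hi) (by simpa using hv)]

lemma pvMask_succ_not (l : List String) (i : Nat) (hi : i < l.length) (hv : pvValid l[i] = false) :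
    pvMask l (i + 1) = pvMask l i := by
  induction l generalizing i with
  | nil => simp at hi
  | cons t ts ih =>
    cases i with
    | zero => simp_all [pvMask, pvMask_zero]
    | succ i =>
      simp only [pvMask]
      rw [ih i (by simpa using hi) (by simpa using hv)]

lemma pvMask_full (l : List String) : pvMask l l.length = l.map (fun t => if pvValid t then "" else t) := by
  induction l with
  | nil => rfl
  | cons t ts ih => simp [pvMask, ih]

lemma index?_mask (l : List String) (i : Nat) (hi : i < l.length) (hv : pvValid l[i] = true) :
    PySem.List.index? (pvMask l i) l[i] = some i := by
  rw [PySem.List.index?_eq_some_iff]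
  refine ⟨(pvMask l i).take i, (pvMask l i).drop (i + 1), ?_, ?_, ?_⟩
  · have hlen : i < (pvMask l i).length := by rw [pvMask_length]; exact hi
    have h1 : (pvMask l i)[i] = l[i] := by
      have := pvMask_getElem_ge l i i le_rfl hi
      rwa [List.getD_eq_getElem _ _ hlen] at this
    calc pvMask l i = (pvMask l i).take i ++ (pvMask l i).drop i := (List.take_append_drop _ _).symm
      _ = (pvMask l i).take i ++ ((pvMask l i)[i] :: (pvMask l i).drop (i + 1)) := by
            rw [List.getElem_cons_drop]
      _ = (pvMask l i).take i ++ (l[i] :: (pvMask l i).drop (i + 1)) := by rw [h1]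
  · simp [List.length_take, pvMask_length]; omega
  · intro hmem
    rcases pvMask_take_mem l i _ hmem with h | h
    · exact pvValid_ne_empty hv h
    · rw [h] at hv; simp at hv

-- A's i-th iteration, from the invariant state ------------------------------------
lemma clearFirst_mask (l : List String) (i : Nat) (hi : i < l.length) (hv : pvValid l[i] = true) :
    clearFirst (pvMask l i) l[i] = pvMask l (i + 1) := by
  unfold clearFirst
  rw [index?_mask l i hi hv]
  exact pvMask_set l i hi hv

-- the two step functions agree on the invariant states
lemma step_eq (l : List String) (i : Nat) (hi : i < l.length)
    (parts : List String) (d h p c q : String) :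
    stepA (pvMask l i, d, h, p, c, q) i
      = (pvMask l (i + 1), (stepB (parts, d, h, p, c, q) l[i]).2) := by
  have hx : (pvMask l i).getD i "" = l[i] := pvMask_getElem_ge l i i le_rfl hi
  simp only [stepA, stepB, hx]
  cases hd : dataValida l[i] with
  | true =>
    obtain ⟨h1, h2, h3, h4⟩ := pvValid_cases hd
    have hv : pvValid l[i] = true := by simp [pvValid, hd]
    simp [hd, h1, h2, h3, h4, clearFirst_mask l i hi hv]
  | false =>
    cases hh : horaValida l[i] with
    | true =>
      obtain ⟨h2, h3, h4⟩ := hora_excl hh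
      have hv : pvValid l[i] = true := by simp [pvValid, hh]
      simp [hd, hh, h2, h3, h4, clearFirst_mask l i hi hv]
    | false =>
      cases hp : prioridadeValida l[i] with
      | true =>
        obtain ⟨h3, h4⟩ := pri_excl hp
        have hv : pvValid l[i] = true := by simp [pvValid, hp]
        simp [hd, hh, hp, h3, h4, clearFirst_mask l i hi hv]
      | false =>
        cases hc : contextoValido l[i] with
        | true =>
          have h4 := ctx_excl hc
          have hv : pvValid l[i] = true := by simp [pvValid, hc]
          simp [hd, hh, hp, hc, h4, clearFirst_mask l i hi hv]
        | false =>
          cases hq : projetoValido l[i] with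
          | true =>
            have hv : pvValid l[i] = true := by simp [pvValid, hq]
            simp [hd, hh, hp, hc, hq, clearFirst_mask l i hi hv]
          | false =>
            have hv : pvValid l[i] = false := by simp [pvValid, hd, hh, hp, hc, hq]
            simp [hd, hh, hp, hc, hq, pvMask_succ_not l i hi hv]

-- the loop invariant
lemma invA (l : List String) (i : Nat) (hi : i ≤ l.length) :
    (List.range i).foldl stepA (l, "", "", "", "", "")
      = (pvMask l i, ((l.take i).foldl stepB ([], "", "", "", "", "")).2) := by
  induction i with
  | zero => simp [pvMask_zero]
  | succ i ih =>
    have hi' : i < l.length := by omega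
    rw [List.range_succ, List.foldl_append, ih (by omega), List.foldl_cons, List.foldl_nil]
    rw [List.take_succ, List.getElem?_eq_getElem hi']
    simp only [Option.toList_some, List.foldl_append, List.foldl_cons, List.foldl_nil]
    exact step_eq l i hi' _ _ _ _ _ _

-- parts accumulator = the unclassified tokens, in order
lemma partsB (l : List String) (p : List String) (f : String × String × String × String × String) :
    (l.foldl stepB (p, f)).1 = p ++ l.filter (fun x => !pvValid x) := by
  induction l generalizing p f with
  | nil => simp
  | cons t ts ih =>
    obtain ⟨d, h, pr, c, q⟩ := f
    simp only [List.foldl_cons, stepB]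
    cases hd : dataValida t with
    | true =>
      have hv : pvValid t = true := by simp [pvValid, hd]
      simp [hd, ih, hv]
    | false =>
      cases hh : horaValida t with
      | true =>
        have hv : pvValid t = true := by simp [pvValid, hh]
        simp [hd, hh, ih, hv]
      | false =>
        cases hp : prioridadeValida t with
        | true =>
          have hv : pvValid t = true := by simp [pvValid, hp]
          simp [hd, hh, hp, ih, hv]
        | false =>
          cases hc : contextoValido t with
          | true =>
            have hv : pvValid t = true := by simp [pvValid, hc]
            simp [hd, hh, hp, hc, ih, hv]
          | false =>
            cases hq : projetoValido t with
            | true =>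
              have hv : pvValid t = true := by simp [pvValid, hq]
              simp [hd, hh, hp, hc, hq, ih, hv]
            | false =>
              have hv : pvValid t = false := by simp [pvValid, hd, hh, hp, hc, hq]
              simp [hd, hh, hp, hc, hq, ih, hv]

-- A's desc loop over the fully-masked list --------------------------------------
lemma descA_go (l : List String) (d : List Char) (hne : ∀ t ∈ l, t ≠ "") :
    List.foldl (fun d x => if x = "" then d else d ++ (x.toList ++ [' '])) d
        (l.map fun t => if pvValid t then "" else t)
      = d ++ List.flatMap (fun x => x.toList ++ [' ']) (l.filter (fun x => !pvValid x)) := by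
  induction l generalizing d with
  | nil => simp
  | cons t ts ih =>
    have hne' : ∀ y ∈ ts, y ≠ "" := fun y hy => hne y (List.mem_cons_of_mem _ hy)
    cases hv : pvValid t with
    | true =>
      simp only [List.map_cons, List.foldl_cons]
      rw [show (if pvValid t = true then "" else t) = "" from by simp [hv], if_pos rfl,
        ih d hne']
      simp [hv]
    | false =>
      have ht : t ≠ "" := hne t List.mem_cons_self
      simp only [List.map_cons, List.foldl_cons]
      rw [show (if pvValid t = true then "" else t) = t from by simp [hv], if_neg ht,
        ih _ hne']
      simp [hv, List.append_assoc]

lemma descA_mask (l : List String) (hne : ∀ t ∈ l, t ≠ "") :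
    descA (l.map fun t => if pvValid t then "" else t)
      = List.flatMap (fun x => x.toList ++ [' ']) (l.filter (fun x => !pvValid x)) := by
  simpa [descA, List.append_assoc] using descA_go l [] hne

lemma slice_neg_one (l : List Char) : PySem.List.slice l none (some (-1)) = l.dropLast := by
  simp [pysem]

lemma dropLast_flatMap_join (parts : List String) :
    (List.flatMap (fun x : String => x.toList ++ [' ']) parts).dropLast
      = PySem.Chars.join [' '] (parts.map String.toList) := by
  induction parts with
  | nil => simp [PySem.Chars.join_nil]
  | cons x rest ih =>
    cases rest with
    | nil => simp [PySem.Chars.join_singleton, List.dropLast_concat]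
    | cons y rest' =>
      have h1 : List.flatMap (fun x : String => x.toList ++ [' ']) (y :: rest') ≠ [] := by
        simp [List.flatMap_cons]
      have h2 : [' '] ++ List.flatMap (fun x : String => x.toList ++ [' ']) (y :: rest') ≠ [] := by
        simp
      rw [List.flatMap_cons, List.append_assoc, List.dropLast_append_of_ne_nil h2,
        List.dropLast_append_of_ne_nil h1, ih]
      simp [PySem.Chars.join_cons_cons, List.append_assoc]

-- tokens produced by str.split() are never empty ---------------------------------
lemma split₀_go_ne (s cur : List Char) (acc : List (List Char))
    (hacc : ∀ t ∈ acc, t ≠ ([] : List Char)) :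
    ∀ t ∈ PySem.Chars.split₀.go s cur acc, t ≠ ([] : List Char) := by
  induction s generalizing cur acc with
  | nil =>
    intro t ht
    unfold PySem.Chars.split₀.go at ht
    by_cases hc : cur.isEmpty
    · rw [if_pos hc, List.mem_reverse] at ht; exact hacc t ht
    · rw [if_neg hc, List.mem_reverse, List.mem_cons] at ht
      rcases ht with rfl | ht
      · simpa [List.isEmpty_iff] using hc
      · exact hacc t ht
  | cons c rest ih =>
    intro t ht
    unfold PySem.Chars.split₀.go at ht
    by_cases hs : PySem.Chars.isspace c
    · rw [if_pos hs] at ht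
      by_cases hc : cur.isEmpty
      · rw [if_pos hc] at ht; exact ih [] acc hacc t ht
      · rw [if_neg hc] at ht
        refine ih [] (cur.reverse :: acc) ?_ t ht
        intro u hu
        rcases List.mem_cons.mp hu with rfl | hu
        · simpa [List.isEmpty_iff] using hc
        · exact hacc u hu
    · rw [if_neg hs] at ht; exact ih (c :: cur) acc hacc t ht

lemma split₀_ne (s : String) : ∀ t ∈ PySem.Str.split₀ s, t ≠ "" := by
  intro t ht he
  unfold PySem.Str.split₀ at ht
  rcases List.mem_map.mp ht with ⟨cs, hcs, rfl⟩
  have hcs' : cs ≠ [] := split₀_go_ne s.toList [] [] (by simp) cs hcs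
  apply hcs'
  have : (String.ofList cs).toList = cs := by simp
  rw [he] at this
  simpa using this.symm

-- ' '.join at the character level
lemma str_join_chars (parts : List String) :
    PySem.Str.join " " parts = String.ofList (PySem.Chars.join [' '] (parts.map String.toList)) := by
  calc PySem.Str.join " " parts
      = String.ofList ((PySem.Str.join " " parts).toList) := String.ofList_toList.symm
    _ = _ := by rw [PySem.Str.toList_join]; rfl

-- the per-line result
lemma line_eq (tokens : List String) (hne : ∀ t ∈ tokens, t ≠ "") :
    (String.ofList (PySem.List.slice (descA (innerA tokens).1) none (some (-1))),
      [(innerA tokens).2.1, (innerA tokens).2.2.1, (innerA tokens).2.2.2.1,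
        (innerA tokens).2.2.2.2.1, (innerA tokens).2.2.2.2.2])
    = (PySem.Str.join " " (tokens.foldl stepB ([], "", "", "", "", "")).1,
      [(tokens.foldl stepB ([], "", "", "", "", "")).2.1,
        (tokens.foldl stepB ([], "", "", "", "", "")).2.2.1,
        (tokens.foldl stepB ([], "", "", "", "", "")).2.2.2.1,
        (tokens.foldl stepB ([], "", "", "", "", "")).2.2.2.2.1,
        (tokens.foldl stepB ([], "", "", "", "", "")).2.2.2.2.2]) := by
  unfold innerA
  rw [invA tokens tokens.length le_rfl, List.take_length]
  rw [show ((pvMask tokens tokens.length,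
      ((tokens.foldl stepB ([], "", "", "", "", "")).2))).1 = pvMask tokens tokens.length from rfl]
  rw [pvMask_full, descA_mask tokens hne, slice_neg_one, dropLast_flatMap_join,
    str_join_chars, partsB]
  simp

-- both ports append exactly one item per line
lemma foldl_items (F G : String → (String × List String)) (hFG : ∀ l, F l = G l) :
    ∀ (lines : List String) (acc : List (String × List String)),
      lines.foldl (fun itens l => itens ++ [F l]) acc
        = lines.foldl (fun itens l => itens ++ [G l]) acc := by
  intro lines
  induction lines with
  | nil => intro acc; rfl
  | cons x xs ih => intro acc; simp only [List.foldl_cons, hFG x]; exact ih _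

-- ===== VERDICT (by name: the statement is the Claim_ definition above) =====
theorem organizar_spec : Claim_equal_organizar := by
  intro linhas _
  show organizar linhas = organizar_alt linhas
  exact foldl_items
    (fun l =>
      let tokens := PySem.Str.split₀ (PySem.Str.strip l)
      let r := innerA tokens
      (String.ofList (PySem.List.slice (descA r.1) none (some (-1))),
        [r.2.1, r.2.2.1, r.2.2.2.1, r.2.2.2.2.1, r.2.2.2.2.2]))
    (fun l =>
      let tokens := PySem.Str.split₀ (PySem.Str.strip l)
      let st := tokens.foldl stepB ([], "", "", "", "", "")
      (PySem.Str.join " " st.1, [st.2.1, st.2.2.1, st.2.2.2.1, st.2.2.2.2.1, st.2.2.2.2.2]))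
    (fun l => line_eq _ (split₀_ne _)) linhas []
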